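-- pv_equiv track=rewrite | github.com/joshroybal/Python-Constraint-Satisfaction-Programming | weather_pictures.py | all_distinct
-- ===== SOURCE A (Python) =====
-- from typing import List, Dict, Optional, Tuple
--
-- def all_distinct(d: Dict[str, Tuple[str, str, str]]) -> bool:
--     checked: List[Tuple[str, str, str]] = []
--     for key in d:
--         #if d[key] in checked:
--         #    return False
--         for t in checked:
--             for item in d[key]:
--                 if item in t:
--                     return False
--         checked.append(d[key])
--     return True
-- ===== SOURCE B (Python) =====
-- def all_distinct(d):
--     counts = {}
--     for t in d.values():
--         for item in dict.fromkeys(t):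
--             counts[item] = counts.get(item, 0) + 1
--     return all(c <= 1 for c in counts.values())
-- ===== Notes on version B (the rewrite author's own statement) =====
-- stated objective: alternative
-- what changed: Replaces A's nested scan of each new tuple against all previously checked tuples by a single pass that tallies each tuple's distinct items in a dict, followed by a separate check that no tally exceeds 1.
import Mathlib
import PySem

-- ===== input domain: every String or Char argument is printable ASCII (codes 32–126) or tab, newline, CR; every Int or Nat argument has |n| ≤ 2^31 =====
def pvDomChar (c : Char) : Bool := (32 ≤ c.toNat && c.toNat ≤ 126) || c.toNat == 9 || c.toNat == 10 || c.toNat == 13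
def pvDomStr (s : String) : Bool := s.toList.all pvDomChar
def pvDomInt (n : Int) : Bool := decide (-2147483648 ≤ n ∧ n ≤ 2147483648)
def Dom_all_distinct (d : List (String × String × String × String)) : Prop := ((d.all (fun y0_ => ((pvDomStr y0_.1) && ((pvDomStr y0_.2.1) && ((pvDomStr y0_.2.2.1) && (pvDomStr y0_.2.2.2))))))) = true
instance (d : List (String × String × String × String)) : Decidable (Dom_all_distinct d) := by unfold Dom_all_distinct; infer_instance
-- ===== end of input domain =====

-- B replaces A's nested cross-tuple scan by a one-pass frequency table over each
-- tuple's distinct items followed by a check that no count exceeds 1 (alternative algorithm).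

-- the three components of a value tuple, in order
def itemsOf (v : String × String × String) : List String := [v.1, v.2.1, v.2.2]

-- ===== PORT A =====
def allDistinctLoop : List (String × String × String × String) → List (String × String × String) → Bool
  | [], _ => true
  | kv :: rest, checked =>
    -- 'for t in checked: for item in d[key]: if item in t: return False'
    if checked.any (fun t => (itemsOf kv.2).any (fun item => (itemsOf t).contains item)) then
      false
    else
      allDistinctLoop rest (checked ++ [kv.2])

def all_distinct (d : List (String × String × String × String)) : Bool :=
  allDistinctLoop d []

-- ===== PORT B =====
def all_distinct_alt (d : List (String × String × String × String)) : Bool :=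
  let counts : PySem.Dict String Int :=
    d.foldl (fun c kv =>
      (PySem.List.dedup (itemsOf kv.2)).foldl (fun c item => c.insert item (c.getD item 0 + 1)) c)
      PySem.Dict.empty
  counts.values.all (fun c => decide (c ≤ 1))

-- ===== PRECONDITION & SPEC =====
def Spec_all_distinct (d : List (String × String × String × String)) (out : Bool) : Prop := out = all_distinct_alt d
instance (d : List (String × String × String × String)) (out : Bool) : Decidable (Spec_all_distinct d out) := by unfold Spec_all_distinct; infer_instance

-- ===== CLAIM (what is proved, stated in full; the proofs are below) =====
def Claim_equal_all_distinct : Prop := ∀ (d : List (String × String × String × String)), Dom_all_distinct d → Spec_all_distinct d (all_distinct d)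

-- ===== LEMMAS AND PROOFS =====

-- two tuples share an item
def Shares (t : String × String × String) (v : String × String × String) : Prop :=
  ∃ s, s ∈ itemsOf t ∧ s ∈ itemsOf v

-- the flattened list B counts over
def flatItems (d : List (String × String × String × String)) : List String :=
  d.flatMap (fun kv => PySem.List.dedup (itemsOf kv.2))

theorem any_shares (checked : List (String × String × String)) (v : String × String × String) :
    (checked.any (fun t => (itemsOf v).any (fun item => (itemsOf t).contains item))) = true
      ↔ ∃ t ∈ checked, Shares t v := by
  simp only [List.any_eq_true, List.contains_iff_mem, Shares]
  constructor
  · rintro ⟨t, ht, item, hiv, hit⟩; exact ⟨t, ht, item, hit, hiv⟩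
  · rintro ⟨t, ht, item, hit, hiv⟩; exact ⟨t, ht, item, hiv, hit⟩

-- A's loop invariant
theorem allDistinctLoop_iff (l : List (String × String × String × String)) :
    ∀ checked, allDistinctLoop l checked = true ↔
      (∀ t ∈ checked, ∀ kv ∈ l, ¬ Shares t kv.2) ∧
        (l.map (fun kv => kv.2)).Pairwise (fun a b => ¬ Shares a b) := by
  induction l with
  | nil => intro checked; simp [allDistinctLoop]
  | cons kv rest ih =>
    intro checked
    simp only [allDistinctLoop]
    split
    · rename_i h
      rw [any_shares] at h
      obtain ⟨t, ht, hsh⟩ := h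
      constructor
      · intro hfalse; exact absurd hfalse (by simp)
      · rintro ⟨h1, _⟩; exact absurd hsh (h1 t ht kv (by simp))
    · rename_i h
      rw [any_shares] at h
      push Not at h
      rw [ih]
      constructor
      · rintro ⟨h1, h2⟩
        refine ⟨?_, ?_⟩
        · intro t ht kv' hkv'
          rcases List.mem_cons.1 hkv' with rfl | hm
          · exact h t ht
          · exact (h1 t (by simp [ht]) kv' hm)
        · rw [List.map_cons, List.pairwise_cons]
          refine ⟨?_, h2⟩
          intro b hb
          obtain ⟨kv', hkv', rfl⟩ := List.mem_map.1 hb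
          exact h1 kv.2 (by simp) kv' hkv'
      · rintro ⟨h1, h2⟩
        rw [List.map_cons, List.pairwise_cons] at h2
        refine ⟨?_, h2.2⟩
        intro t ht kv' hkv'
        rcases List.mem_append.1 ht with hm | hm
        · exact h1 t hm kv' (by simp [hkv'])
        · simp only [List.mem_singleton] at hm; subst hm
          exact h2.1 _ (List.mem_map.2 ⟨kv', hkv', rfl⟩)

-- count of s in the flattened dedup'd items
theorem count_flatItems (d : List (String × String × String × String)) (s : String) :
    (flatItems d).count s =
      (d.map (fun kv => kv.2)).countP (fun v => decide (s ∈ itemsOf v)) := by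
  induction d with
  | nil => simp [flatItems]
  | cons kv rest ih =>
    simp only [flatItems, List.flatMap_cons, List.count_append, List.map_cons, List.countP_cons]
    rw [← flatItems, ih]
    have hd : (PySem.List.dedup (itemsOf kv.2)).count s = if s ∈ itemsOf kv.2 then 1 else 0 := by
      by_cases hm : s ∈ itemsOf kv.2
      · simp only [hm, if_true]
        have h1 : s ∈ PySem.List.dedup (itemsOf kv.2) := (PySem.List.mem_dedup _ _).2 hm
        have h2 : ∀ a, (PySem.List.dedup (itemsOf kv.2)).count a ≤ 1 :=
          List.nodup_iff_count_le_one.mp (PySem.List.nodup_dedup _)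
        have h3 := List.count_pos_iff.2 h1
        have h4 := h2 s
        omega
      · simp [List.count_eq_zero, hm]
    rw [hd]
    by_cases hm : s ∈ itemsOf kv.2 <;> simp [hm] <;> try omega

-- two elements of a list satisfying a predicate, as a two-element sublist
theorem two_of_countP {α : Type} (p : α → Bool) (L : List α) (h : 2 ≤ L.countP p) :
    ∃ a b, List.Sublist [a, b] L ∧ p a = true ∧ p b = true := by
  induction L with
  | nil => simp at h
  | cons x tl ih =>
    rw [List.countP_cons] at h
    by_cases hx : p x = true
    · have h1 : 0 < tl.countP p := by simp only [hx, if_true] at h; omega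
      obtain ⟨b, hbm, hbp⟩ := List.countP_pos_iff.1 h1
      exact ⟨x, b, List.Sublist.cons₂ x (List.singleton_sublist.2 hbm), hx, hbp⟩
    · obtain ⟨a, b, hs, ha, hb⟩ := ih (by simp [hx] at h; omega)
      exact ⟨a, b, hs.cons x, ha, hb⟩

-- pairwise-no-share ↔ every count in the flattened list ≤ 1
theorem pairwise_iff_counts (d : List (String × String × String × String)) :
    (d.map (fun kv => kv.2)).Pairwise (fun a b => ¬ Shares a b) ↔
      ∀ s, (flatItems d).count s ≤ 1 := by
  constructor
  · intro hp s
    rw [count_flatItems]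
    by_contra hgt
    push Not at hgt
    obtain ⟨a, b, hsub, ha, hb⟩ :=
      two_of_countP (fun v => decide (s ∈ itemsOf v)) (d.map (fun kv => kv.2)) (by omega)
    exact (List.pairwise_iff_forall_sublist.1 hp hsub)
      ⟨s, of_decide_eq_true ha, of_decide_eq_true hb⟩
  · intro hc
    rw [List.pairwise_iff_forall_sublist]
    rintro a b hsub ⟨s, ha, hb⟩
    have h1 := hc s
    rw [count_flatItems] at h1
    have h2 := List.Sublist.countP_le (p := fun v => decide (s ∈ itemsOf v)) hsub
    simp [ha, hb, List.countP_map] at h1 h2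
    omega

-- B computes the counter of flatItems
theorem alt_counts (d : List (String × String × String × String)) :
    (d.foldl (fun c kv =>
        (PySem.List.dedup (itemsOf kv.2)).foldl (fun c item => c.insert item (c.getD item 0 + 1)) c)
      PySem.Dict.empty) = PySem.Dict.counter (flatItems d) := by
  rw [← PySem.Dict.foldl_insert_getD_add_one_eq_counter]
  unfold flatItems
  generalize (PySem.Dict.empty : PySem.Dict String Int) = c
  induction d generalizing c with
  | nil => simp
  | cons kv rest ih =>
    rw [List.foldl_cons, List.flatMap_cons, List.foldl_append]
    exact ih _

theorem alt_iff (d : List (String × String × String × String)) :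
    all_distinct_alt d = true ↔ ∀ s, (flatItems d).count s ≤ 1 := by
  unfold all_distinct_alt
  rw [alt_counts]
  simp only [PySem.Dict.values, PySem.Dict.items_counter, List.all_map, List.all_eq_true]
  constructor
  · intro h s
    by_cases hm : s ∈ flatItems d
    · have := h s (by exact (PySem.Set.mem_ofList _ _).2 hm)
      simp only [Function.comp] at this
      exact_mod_cast of_decide_eq_true this
    · simp [List.count_eq_zero.2 hm]
  · intro h s hs
    simp only [Function.comp]
    exact decide_eq_true (by exact_mod_cast h s)

theorem a_iff (d : List (String × String × String × String)) :
    all_distinct d = true ↔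
      (d.map (fun kv => kv.2)).Pairwise (fun a b => ¬ Shares a b) := by
  unfold all_distinct
  rw [allDistinctLoop_iff]
  simp

-- ===== VERDICT (by name: the statement is the Claim_ definition above) =====
theorem all_distinct_spec : Claim_equal_all_distinct := by
  intro d _
  unfold Spec_all_distinct
  have : (all_distinct d = true) ↔ (all_distinct_alt d = true) := by
    rw [a_iff, alt_iff, pairwise_iff_counts]
  cases h1 : all_distinct d <;> cases h2 : all_distinct_alt d <;> simp_all
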